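-- pv_equiv track=rewrite | github.com/MACS-30121-25F/TT_solutions | tt3_dictionaries/soln/cfpb_soln_to_publish.py | complaints_by_company
-- ===== SOURCE A (Python) =====
-- def complaints_by_company(complaints):
--     '''
--     Create a dictionary that maps the name of a company to a list of the
--     complaint dictionaries that concern that company.
--
--     Inputs:
--         complaints (list) A list of complaints, where each complaint is a
--             dictionary
--
--     Returns: (dict) mapping the name of the company to a list of complaints
--     '''
--
--     by_company = {}
--     for complaint in complaints:
--         company = complaint["Company"]
--         if company not in by_company:
--             by_company[company] = []
--         by_company[company].append(complaint)
--
--     return by_company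
-- ===== SOURCE B (Python) =====
-- def complaints_by_company(complaints):
--     '''Group complaints by company: collect the distinct company names in
--     first-occurrence order, then build each group with one filtering pass.'''
--     companies = list(dict.fromkeys(c["Company"] for c in complaints))
--     return {co: [c for c in complaints if c["Company"] == co] for co in companies}
-- ===== Notes on version B (the rewrite author's own statement) =====
-- stated objective: alternative
-- what changed: Replaces the incremental dict-accumulation loop with a two-phase pass: collect the distinct company names in first-occurrence order, then build each group by filtering the list, assembled in a dict comprehension.
import Mathlib
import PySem

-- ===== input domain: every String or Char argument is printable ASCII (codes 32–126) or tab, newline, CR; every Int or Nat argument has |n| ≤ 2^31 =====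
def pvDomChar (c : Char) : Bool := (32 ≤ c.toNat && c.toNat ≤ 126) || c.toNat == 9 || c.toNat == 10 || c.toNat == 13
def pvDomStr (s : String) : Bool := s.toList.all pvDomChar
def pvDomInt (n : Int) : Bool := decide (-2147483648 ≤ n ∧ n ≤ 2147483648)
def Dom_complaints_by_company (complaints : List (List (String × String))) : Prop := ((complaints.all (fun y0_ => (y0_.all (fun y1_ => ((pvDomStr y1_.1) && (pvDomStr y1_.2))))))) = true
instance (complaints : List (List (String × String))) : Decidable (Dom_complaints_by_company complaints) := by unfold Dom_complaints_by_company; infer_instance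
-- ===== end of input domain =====

-- B replaces A's incremental dict-accumulation with a two-phase pass (distinct
-- company names in first-occurrence order, then one filtering pass per company);
-- an alternative decomposition, not claimed faster.


-- ===== PORT A =====
-- complaint["Company"] = first-match lookup in the association list (none = KeyError, excluded by Pre_)
def complaints_by_company (complaints : List (List (String × String))) : List (String × List (List (String × String))) :=
  (complaints.foldl
    (fun by_company complaint =>
      match List.lookup "Company" complaint with
      | none => by_company   -- Python raises KeyError here; Pre_ excludes this
      | some company =>
        let by_company := if by_company.contains company then by_company else by_company.insert company []
        by_company.modify company [] (fun v => v ++ [complaint]))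
    PySem.Dict.empty).items

-- ===== PORT B =====
def complaints_by_company_alt (complaints : List (List (String × String))) : List (String × List (List (String × String))) :=
  let companies := PySem.Set.ofList (complaints.filterMap (fun c => List.lookup "Company" c))
  companies.map (fun co => (co, complaints.filter (fun c => List.lookup "Company" c == some co)))

-- ===== PRECONDITION & SPEC =====
-- Pre_ excludes complaints missing the "Company" key, on which Python A raises KeyError.
def Pre_complaints_by_company (complaints : List (List (String × String))) : Prop :=
  (complaints.all (fun c => c.any (fun p => p.1 == "Company"))) = true
instance (complaints : List (List (String × String))) : Decidable (Pre_complaints_by_company complaints) := by unfold Pre_complaints_by_company; infer_instance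
def pvWitness_complaints_by_company : (List (List (String × String))) := [[("Company", "Acme"), ("Issue", "late fee")], [("Company", "Bolt")], [("Company", "Acme")]]

def Spec_complaints_by_company (complaints : List (List (String × String))) (out : List (String × List (List (String × String)))) : Prop := out = complaints_by_company_alt complaints
instance (complaints : List (List (String × String))) (out : List (String × List (List (String × String)))) : Decidable (Spec_complaints_by_company complaints out) := by unfold Spec_complaints_by_company; infer_instance

-- ===== CLAIM (what is proved, stated in full; the proofs are below) =====
def Claim_equal_complaints_by_company : Prop := ∀ (complaints : List (List (String × String))), Dom_complaints_by_company complaints → Pre_complaints_by_company complaints → Spec_complaints_by_company complaints (complaints_by_company complaints)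

-- ===== LEMMAS AND PROOFS =====

-- A's loop body, named for the lemmas
def cbcStep (d : PySem.Dict String (List (List (String × String)))) (complaint : List (String × String)) : PySem.Dict String (List (List (String × String))) :=
  match List.lookup "Company" complaint with
  | none => d
  | some company =>
    let d := if d.contains company then d else d.insert company []
    d.modify company [] (fun v => v ++ [complaint])

lemma cbcStep_keys (d : PySem.Dict String (List (List (String × String)))) (c : List (String × String)) :
    (cbcStep d c).keys = match List.lookup "Company" c with
      | none => d.keys
      | some co => PySem.Set.add d.keys co := by
  unfold cbcStep
  cases h : List.lookup "Company" c with
  | none => rfl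
  | some co =>
    simp only []
    by_cases hc : d.contains co = true
    · rw [if_pos hc, PySem.Dict.keys_modify, PySem.Dict.keys_insert_of_contains _ _ hc]
      have hm : co ∈ d.keys := (PySem.Dict.contains_iff_mem_keys d co).mp hc
      simp [PySem.Set.add, hm]
    · have hcf : d.contains co = false := by simpa using hc
      rw [if_neg (by simp [hcf]), PySem.Dict.keys_modify, PySem.Dict.insert_insert_self,
        PySem.Dict.keys_insert_of_not_contains _ _ hcf]
      have hm : co ∉ d.keys := fun hm => by
        rw [(PySem.Dict.contains_iff_mem_keys d co).mpr hm] at hcf; cases hcf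
      simp [PySem.Set.add, hm]

lemma cbcStep_nodup (d : PySem.Dict String (List (List (String × String)))) (c : List (String × String))
    (h : d.keys.Nodup) : (cbcStep d c).keys.Nodup := by
  rw [cbcStep_keys]
  cases List.lookup "Company" c with
  | none => exact h
  | some co => exact PySem.Set.nodup_add _ _ h

lemma cbcStep_getD (d : PySem.Dict String (List (List (String × String)))) (c : List (String × String)) (co : String) :
    (cbcStep d c).getD co [] =
      d.getD co [] ++ (if List.lookup "Company" c == some co then [c] else []) := by
  unfold cbcStep
  cases h : List.lookup "Company" c with
  | none => simp
  | some k =>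
    simp only []
    by_cases hk : co = k
    · subst hk
      by_cases hc : d.contains co = true
      · simp [hc, PySem.Dict.getD_modify_self]
      · have hcf : d.contains co = false := by simpa using hc
        rw [if_neg (by simp [hcf]), PySem.Dict.getD_modify_self, PySem.Dict.getD_insert_self,
          PySem.Dict.getD_of_not_contains _ _ hcf]
        simp
    · have hne : co ≠ k := hk
      by_cases hc : d.contains k = true
      · rw [if_pos hc, PySem.Dict.getD_modify_of_ne _ _ _ hne]
        simp [Ne.symm hne]
      · have hcf : d.contains k = false := by simpa using hc
        rw [if_neg (by simp [hcf]), PySem.Dict.getD_modify_of_ne _ _ _ hne,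
          PySem.Dict.getD_insert_of_ne _ _ _ hne]
        simp [Ne.symm hne]

-- the fold's keys are the distinct companies, continuing from d.keys
lemma cbc_fold_keys (l : List (List (String × String))) (d : PySem.Dict String (List (List (String × String)))) :
    (l.foldl cbcStep d).keys = PySem.Set.update d.keys (l.filterMap (fun c => List.lookup "Company" c)) := by
  induction l generalizing d with
  | nil => simp [PySem.Set.update]
  | cons c t ih =>
    simp only [List.foldl_cons, List.filterMap_cons]
    cases h : List.lookup "Company" c with
    | none =>
      rw [ih]
      congr 1
      rw [cbcStep_keys, h]
    | some co =>
      rw [ih, PySem.Set.update_cons]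
      congr 1
      rw [cbcStep_keys, h]

lemma cbc_fold_nodup (l : List (List (String × String))) (d : PySem.Dict String (List (List (String × String))))
    (h : d.keys.Nodup) : (l.foldl cbcStep d).keys.Nodup := by
  induction l generalizing d with
  | nil => exact h
  | cons c t ih => exact ih _ (cbcStep_nodup _ _ h)

lemma cbc_fold_getD (l : List (List (String × String))) (d : PySem.Dict String (List (List (String × String)))) (co : String) :
    (l.foldl cbcStep d).getD co [] =
      d.getD co [] ++ l.filter (fun c => List.lookup "Company" c == some co) := by
  induction l generalizing d with
  | nil => simp
  | cons c t ih =>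
    simp only [List.foldl_cons, List.filter_cons]
    rw [ih, cbcStep_getD]
    by_cases h : (List.lookup "Company" c == some co) = true
    · simp [h]
    · simp only [Bool.not_eq_true] at h
      simp [h]

-- ===== VERDICT (by name: the statement is the Claim_ definition above) =====
theorem complaints_by_company_spec : Claim_equal_complaints_by_company := by
  intro complaints _ _
  unfold Spec_complaints_by_company complaints_by_company complaints_by_company_alt
  have hfold : (fun by_company complaint =>
      match List.lookup "Company" complaint with
      | none => by_company
      | some company =>
        let by_company := if by_company.contains company then by_company else by_company.insert company []
        by_company.modify company [] (fun v => v ++ [complaint])) = cbcStep := rfl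
  rw [hfold]
  have hnd : (complaints.foldl cbcStep PySem.Dict.empty).keys.Nodup :=
    cbc_fold_nodup _ _ (by simp [PySem.Dict.empty, PySem.Dict.keys])
  rw [PySem.Dict.items_eq_map_keys _ hnd []]
  rw [cbc_fold_keys]
  have hkeys : PySem.Set.update (PySem.Dict.empty : PySem.Dict String (List (List (String × String)))).keys
      (complaints.filterMap (fun c => List.lookup "Company" c))
      = PySem.Set.ofList (complaints.filterMap (fun c => List.lookup "Company" c)) := by
    simp [PySem.Dict.empty, PySem.Dict.keys, PySem.Set.update_nil_left]
  rw [hkeys]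
  apply List.map_congr_left
  intro co _
  rw [cbc_fold_getD]
  simp
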